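-- pv_equiv track=rewrite | github.com/aklofas/kicad-happy-testharness | add_repos.py | _find_category_insert_point
-- ===== SOURCE A (Python) =====
-- def _find_category_insert_point(lines, category):
--     """Find the line index to insert a new repo entry under a ## category.
--
--     Returns the index of the last ``- http`` line in that section + 1,
--     or the line before the next ``## `` header if the section is empty.
--     Falls back to the end of "Miscellaneous KiCad projects" section.
--     """
--     fallback_category = "Miscellaneous KiCad projects"
--     target = category
--     found_target = False
--     insert_at = None
--
--     for attempt in range(2):
--         in_section = False
--         last_entry_in_section = None
--
--         for i, line in enumerate(lines):
--             stripped = line.strip()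
--             if stripped.startswith("## "):
--                 header = stripped[3:].strip()
--                 if header == target:
--                     in_section = True
--                     found_target = True
--                     last_entry_in_section = i  # after the header
--                 elif in_section:
--                     # Reached next section — insert before this header
--                     # Back up past any blank lines between entries and header
--                     insert_at = i
--                     while insert_at > 0 and not lines[insert_at - 1].strip():
--                         insert_at -= 1
--                     return insert_at
--             elif in_section and stripped.startswith("- http"):
--                 last_entry_in_section = i
--
--         if in_section and last_entry_in_section is not None:
--             # Section is the last one in the file
--             return last_entry_in_section + 1
--
--         if not found_target and attempt == 0:
--             target = fallback_category
--         else: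
--             break
--
--     # Last resort: append before end of file
--     return len(lines)
-- ===== SOURCE B (Python) =====
-- def _find_category_insert_point(lines, category):
--     # Index-based reimplementation: strip once, list all header positions, then
--     # compute the insert point from first/next-header indices and the last
--     # candidate index, instead of a stateful two-attempt scan.
--     stripped = [l.strip() for l in lines]
--     heads = [(i, s[3:].strip()) for i, s in enumerate(stripped) if s.startswith("## ")]
--
--     def locate(cat):
--         mine = [i for i, h in heads if h == cat]
--         if not mine:
--             return None
--         first = mine[0]
--         nxt = [i for i, h in heads if first < i and h != cat]
--         if nxt:
--             j = nxt[0]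
--             while j > 0 and not stripped[j - 1]:
--                 j -= 1
--             return j
--         cands = [i for i, s in enumerate(stripped)
--                  if i in mine or (first < i and s.startswith("- http"))]
--         return cands[-1] + 1
--
--     idx = locate(category)
--     if idx is None:
--         idx = locate("Miscellaneous KiCad projects")
--     return len(lines) if idx is None else idx
-- ===== Notes on version B (the rewrite author's own statement) =====
-- stated objective: alternative
-- what changed: Replaces A's two-attempt loop with mutable in_section/found_target/last_entry state by a single pre-strip pass that lists header positions and then computes the insert point from the first matching header, the first later non-matching header, and the last candidate index, with the fallback as a second explicit locate call.
import Mathlib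
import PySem

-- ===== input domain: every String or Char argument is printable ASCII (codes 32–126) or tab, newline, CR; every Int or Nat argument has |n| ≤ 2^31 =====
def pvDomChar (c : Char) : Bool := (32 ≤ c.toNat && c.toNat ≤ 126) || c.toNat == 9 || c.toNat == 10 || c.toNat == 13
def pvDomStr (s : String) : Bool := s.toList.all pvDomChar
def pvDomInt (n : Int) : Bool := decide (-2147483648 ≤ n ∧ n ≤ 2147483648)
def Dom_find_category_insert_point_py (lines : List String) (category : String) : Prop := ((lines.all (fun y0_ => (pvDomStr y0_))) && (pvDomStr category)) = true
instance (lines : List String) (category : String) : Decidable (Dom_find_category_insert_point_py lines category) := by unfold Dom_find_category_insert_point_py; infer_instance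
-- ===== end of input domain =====

-- B replaces A's stateful two-attempt scan (in_section/found_target/last_entry flags) by an
-- index-based computation over lists of header positions; objective: alternative decomposition.

-- ===== PORT A =====
-- `while insert_at > 0 and not lines[insert_at-1].strip(): insert_at -= 1` (hand-ported
-- structural recursion on the index; the index is always in range, `getD` is a totality guard).
def pvBackupA (lines : List String) : Nat → Nat
  | 0 => 0
  | k+1 => if PySem.Str.strip (lines.getD k "") == "" then pvBackupA lines k else k + 1

-- the inner `for i, line in enumerate(lines)` loop of one attempt, with state
-- (in_section, last_entry_in_section, found_target); first component = early-returned value.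
def pvLoopA (lines : List String) (target : String) :
    List (Int × String) → Bool → Option Int → Bool → Option Int × Bool × Option Int × Bool
  | [], ins, last, found => (none, ins, last, found)
  | (i, line) :: rest, ins, last, found =>
    let stripped := PySem.Str.strip line
    if PySem.Str.startswith stripped "## " then
      let header := PySem.Str.strip (PySem.Str.slice stripped (some 3) none)
      if header == target then pvLoopA lines target rest true (some i) true
      else if ins then (some ((pvBackupA lines i.toNat : Nat) : Int), ins, last, found)
      else pvLoopA lines target rest ins last found
    else if ins && PySem.Str.startswith stripped "- http" then
      pvLoopA lines target rest ins (some i) found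
    else pvLoopA lines target rest ins last found

-- one iteration of `for attempt in range(2)`: inner loop, then the `last_entry+1` return;
-- second component is `found_target` after the attempt.
def pvAttemptA (lines : List String) (target : String) : Option Int × Bool :=
  match pvLoopA lines target (PySem.List.enumerate lines 0) false none false with
  | (some r, _, _, found) => (some r, found)
  | (none, ins, last, found) =>
    match ins, last with
    | true, some le => (some (le + 1), found)
    | _, _ => (none, found)

def find_category_insert_point_py (lines : List String) (category : String) : Int :=
  match pvAttemptA lines category with
  | (some r, _) => r
  | (none, found) =>
    if !found then
      match pvAttemptA lines "Miscellaneous KiCad projects" with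
      | (some r, _) => r
      | (none, _) => (lines.length : Int)
    else (lines.length : Int)

-- ===== PORT B =====
def pvHeaderOf (s : String) : String := PySem.Str.strip (PySem.Str.slice s (some 3) none)

-- `while j > 0 and not stripped[j-1]: j -= 1` on the pre-stripped list.
def pvBackupB (st : List String) : Nat → Nat
  | 0 => 0
  | k+1 => if st.getD k "" == "" then pvBackupB st k else k + 1

def pvHeads (st : List String) : List (Int × String) :=
  ((PySem.List.enumerate st 0).filter (fun p => PySem.Str.startswith p.2 "## ")).map
    (fun p => (p.1, pvHeaderOf p.2))

def pvLocate (st : List String) (heads : List (Int × String)) (cat : String) : Option Int :=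
  let mine := ((heads.filter (fun p => p.2 == cat)).map (·.1))
  match mine with
  | [] => none
  | first :: _ =>
    let nxt := ((heads.filter (fun p => decide (first < p.1) && p.2 != cat)).map (·.1))
    match nxt with
    | j :: _ => some ((pvBackupB st j.toNat : Nat) : Int)
    | [] =>
      let cands := (((PySem.List.enumerate st 0).filter
          (fun p => mine.contains p.1 || (decide (first < p.1) && PySem.Str.startswith p.2 "- http"))).map (·.1))
      some (PySem.List.pyGetD cands (-1) 0 + 1)

def find_category_insert_point_py_alt (lines : List String) (category : String) : Int :=
  let st := lines.map PySem.Str.strip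
  let heads := pvHeads st
  match pvLocate st heads category with
  | some r => r
  | none =>
    match pvLocate st heads "Miscellaneous KiCad projects" with
    | some r => r
    | none => (lines.length : Int)

-- ===== PRECONDITION & SPEC =====
def Spec_find_category_insert_point_py (lines : List String) (category : String) (out : Int) : Prop := out = find_category_insert_point_py_alt lines category
instance (lines : List String) (category : String) (out : Int) : Decidable (Spec_find_category_insert_point_py lines category out) := by unfold Spec_find_category_insert_point_py; infer_instance

-- ===== CLAIM (what is proved, stated in full; the proofs are below) =====
def Claim_equal_find_category_insert_point_py : Prop := ∀ (lines : List String) (category : String), Dom_find_category_insert_point_py lines category → Spec_find_category_insert_point_py lines category (find_category_insert_point_py lines category)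

-- ===== LEMMAS AND PROOFS =====

def pvCat (cat : String) (p : Int × String) : Bool :=
  PySem.Str.startswith (PySem.Str.strip p.2) "## " && (pvHeaderOf (PySem.Str.strip p.2) == cat)
def pvOth (cat : String) (p : Int × String) : Bool :=
  PySem.Str.startswith (PySem.Str.strip p.2) "## " && !(pvHeaderOf (PySem.Str.strip p.2) == cat)
def pvEnt (p : Int × String) : Bool := PySem.Str.startswith (PySem.Str.strip p.2) "- http"

def pvLastC (cat : String) (E : List (Int × String)) (m : Int) : Int :=
  E.foldl (fun m p => if pvCat cat p || pvEnt p then p.1 else m) m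


theorem pvEnumMap {α β : Type} (f : α → β) (xs : List α) (s : Int) :
    PySem.List.enumerate (xs.map f) s =
      (PySem.List.enumerate xs s).map (fun p => (p.1, f p.2)) := by
  induction xs generalizing s with
  | nil => simp [PySem.List.enumerate_nil]
  | cons x t ih => simp [PySem.List.enumerate_cons, ih]

theorem pvMemEnum {α : Type} {xs : List α} {s : Int} {p : Int × α}
    (h : p ∈ PySem.List.enumerate xs s) :
    s ≤ p.1 ∧ p.1 < s + xs.length ∧ p.2 ∈ xs := by
  induction xs generalizing s with
  | nil => simp [PySem.List.enumerate_nil] at h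
  | cons x t ih =>
    rw [PySem.List.enumerate_cons] at h
    rcases List.mem_cons.1 h with h | h
    · subst h; refine ⟨le_refl _, by simp [List.length_cons], by simp⟩
    · obtain ⟨h1, h2, h3⟩ := ih h
      refine ⟨by omega, by simp; omega, List.mem_cons_of_mem _ h3⟩

theorem pvEnumFstInj {α : Type} {xs : List α} {s : Int} {p q : Int × α}
    (hp : p ∈ PySem.List.enumerate xs s) (hq : q ∈ PySem.List.enumerate xs s)
    (h : p.1 = q.1) : p = q := by
  induction xs generalizing s with
  | nil => simp [PySem.List.enumerate_nil] at hp
  | cons x t ih =>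
    rw [PySem.List.enumerate_cons] at hp hq
    rcases List.mem_cons.1 hp with hp' | hp' <;> rcases List.mem_cons.1 hq with hq' | hq'
    · rw [hp', hq']
    · subst hp'; have := (pvMemEnum hq').1; simp at h; omega
    · subst hq'; have := (pvMemEnum hp').1; simp at h; omega
    · exact ih hp' hq'


theorem pvBackupEq (lines : List String) (k : Nat) :
    pvBackupB (lines.map PySem.Str.strip) k = pvBackupA lines k := by
  induction k with
  | zero => rfl
  | succ k ih =>
    have hg : (lines.map PySem.Str.strip).getD k "" = PySem.Str.strip (lines.getD k "") := by
      by_cases hk : k < lines.length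
      · rw [List.getD_eq_getElem _ _ (by simpa using hk), List.getD_eq_getElem _ _ hk]
        simp
      · rw [List.getD_eq_default _ _ (by simpa using hk), List.getD_eq_default _ _ (by omega)]
        rfl
    rw [show pvBackupB (List.map PySem.Str.strip lines) (k+1) =
        (if (List.map PySem.Str.strip lines).getD k "" == "" then pvBackupB (List.map PySem.Str.strip lines) k else k + 1) from rfl,
      hg, ih]
    rfl


theorem pvHeaderOf_eq (s : String) :
    PySem.Str.strip (PySem.Str.slice s (some 3) none) = pvHeaderOf s := rfl

theorem pvLoopA_cons_cat {cat : String} {i : Int} {line : String}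
    (lines : List String) (rest : List (Int × String)) {ins : Bool} {last : Option Int} {found : Bool}
    (h1 : PySem.Str.startswith (PySem.Str.strip line) "## " = true)
    (h2 : (pvHeaderOf (PySem.Str.strip line) == cat) = true) :
    pvLoopA lines cat ((i, line) :: rest) ins last found =
      pvLoopA lines cat rest true (some i) true := by
  simp only [pvLoopA, pvHeaderOf_eq, h1, h2, if_true]

theorem pvLoopA_cons_oth_ins {cat : String} {i : Int} {line : String}
    (lines : List String) (rest : List (Int × String)) {last : Option Int} {found : Bool}
    (h1 : PySem.Str.startswith (PySem.Str.strip line) "## " = true)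
    (h2 : (pvHeaderOf (PySem.Str.strip line) == cat) = false) :
    pvLoopA lines cat ((i, line) :: rest) true last found =
      (some ((pvBackupA lines i.toNat : Nat) : Int), true, last, found) := by
  simp only [pvLoopA, pvHeaderOf_eq, h1, h2]
  simp

theorem pvLoopA_cons_oth_noins {cat : String} {i : Int} {line : String}
    (lines : List String) (rest : List (Int × String)) {last : Option Int} {found : Bool}
    (h1 : PySem.Str.startswith (PySem.Str.strip line) "## " = true)
    (h2 : (pvHeaderOf (PySem.Str.strip line) == cat) = false) :
    pvLoopA lines cat ((i, line) :: rest) false last found =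
      pvLoopA lines cat rest false last found := by
  simp only [pvLoopA, pvHeaderOf_eq, h1, h2]
  simp

theorem pvLoopA_cons_ent_ins {cat : String} {i : Int} {line : String}
    (lines : List String) (rest : List (Int × String)) {last : Option Int} {found : Bool}
    (h1 : PySem.Str.startswith (PySem.Str.strip line) "## " = false)
    (h2 : PySem.Str.startswith (PySem.Str.strip line) "- http" = true) :
    pvLoopA lines cat ((i, line) :: rest) true last found =
      pvLoopA lines cat rest true (some i) found := by
  simp only [pvLoopA, pvHeaderOf_eq, h1, h2]
  simp

theorem pvLoopA_cons_noent {cat : String} {i : Int} {line : String}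
    (lines : List String) (rest : List (Int × String)) {ins : Bool} {last : Option Int} {found : Bool}
    (h1 : PySem.Str.startswith (PySem.Str.strip line) "## " = false)
    (h2 : PySem.Str.startswith (PySem.Str.strip line) "- http" = false) :
    pvLoopA lines cat ((i, line) :: rest) ins last found =
      pvLoopA lines cat rest ins last found := by
  simp only [pvLoopA, pvHeaderOf_eq, h1, h2]
  simp

theorem pvLoopA_cons_noins {cat : String} {i : Int} {line : String}
    (lines : List String) (rest : List (Int × String)) {last : Option Int} {found : Bool}
    (h1 : PySem.Str.startswith (PySem.Str.strip line) "## " = false) :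
    pvLoopA lines cat ((i, line) :: rest) false last found =
      pvLoopA lines cat rest false last found := by
  simp only [pvLoopA, pvHeaderOf_eq, h1]
  simp

theorem pvPhase1 (lines : List String) (cat : String) (E E' : List (Int × String))
    (h : ∀ p ∈ E, pvCat cat p = false) :
    pvLoopA lines cat (E ++ E') false none false = pvLoopA lines cat E' false none false := by
  induction E with
  | nil => simp
  | cons p E ih =>
    obtain ⟨i, line⟩ := p
    have hc := h (i, line) List.mem_cons_self
    have ih' := ih (fun q hq => h q (List.mem_cons_of_mem _ hq))
    unfold pvCat at hc
    rw [List.cons_append]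
    cases hsw : PySem.Str.startswith (PySem.Str.strip line) "## " with
    | false => rw [pvLoopA_cons_noins lines _ hsw, ih']
    | true =>
      rw [hsw] at hc
      cases heq : pvHeaderOf (PySem.Str.strip line) == cat with
      | true => rw [heq] at hc; simp at hc
      | false => rw [pvLoopA_cons_oth_noins lines _ hsw heq, ih']

theorem pvPhase2ret (lines : List String) (cat : String) (E : List (Int × String))
    (m : Int) (q : Int × String) (h : E.find? (pvOth cat) = some q) :
    ∃ ins' last', pvLoopA lines cat E true (some m) true =
      (some ((pvBackupA lines q.1.toNat : Nat) : Int), ins', last', true) := by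
  induction E generalizing m with
  | nil => simp at h
  | cons p E ih =>
    obtain ⟨i, line⟩ := p
    rw [List.find?_cons] at h
    cases hsw : PySem.Str.startswith (PySem.Str.strip line) "## " with
    | true =>
      cases heq : pvHeaderOf (PySem.Str.strip line) == cat with
      | true =>
        have ho : pvOth cat (i, line) = false := by unfold pvOth; rw [hsw, heq]; rfl
        rw [ho] at h; simp only at h
        rw [pvLoopA_cons_cat lines _ hsw heq]
        exact ih i h
      | false =>
        have ho : pvOth cat (i, line) = true := by unfold pvOth; rw [hsw, heq]; rfl
        rw [ho] at h; simp only [Option.some.injEq] at h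
        subst h
        exact ⟨true, some m, by rw [pvLoopA_cons_oth_ins lines _ hsw heq]⟩
    | false =>
      have ho : pvOth cat (i, line) = false := by unfold pvOth; rw [hsw]; rfl
      rw [ho] at h; simp only at h
      cases he : PySem.Str.startswith (PySem.Str.strip line) "- http" with
      | true => rw [pvLoopA_cons_ent_ins lines _ hsw he]; exact ih i h
      | false => rw [pvLoopA_cons_noent lines _ hsw he]; exact ih m h

theorem pvPhase2end (lines : List String) (cat : String) (E : List (Int × String))
    (m : Int) (h : E.find? (pvOth cat) = none) :
    pvLoopA lines cat E true (some m) true = (none, true, some (pvLastC cat E m), true) := by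
  induction E generalizing m with
  | nil => simp [pvLoopA, pvLastC]
  | cons p E ih =>
    obtain ⟨i, line⟩ := p
    rw [List.find?_cons] at h
    cases hsw : PySem.Str.startswith (PySem.Str.strip line) "## " with
    | true =>
      cases heq : pvHeaderOf (PySem.Str.strip line) == cat with
      | true =>
        have ho : pvOth cat (i, line) = false := by unfold pvOth; rw [hsw, heq]; rfl
        rw [ho] at h; simp only at h
        have hcat : (pvCat cat (i, line) || pvEnt (i, line)) = true := by
          unfold pvCat; rw [hsw, heq]; rfl
        rw [pvLoopA_cons_cat lines _ hsw heq, ih i h]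
        unfold pvLastC
        rw [List.foldl_cons, if_pos hcat]
      | false =>
        have ho : pvOth cat (i, line) = true := by unfold pvOth; rw [hsw, heq]; rfl
        rw [ho] at h; simp at h
    | false =>
      have ho : pvOth cat (i, line) = false := by unfold pvOth; rw [hsw]; rfl
      rw [ho] at h; simp only at h
      cases he : PySem.Str.startswith (PySem.Str.strip line) "- http" with
      | true =>
        have hcat : (pvCat cat (i, line) || pvEnt (i, line)) = true := by
          unfold pvCat pvEnt; rw [hsw, he]; rfl
        rw [pvLoopA_cons_ent_ins lines _ hsw he, ih i h]
        unfold pvLastC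
        rw [List.foldl_cons, if_pos hcat]
      | false =>
        have hcat : (pvCat cat (i, line) || pvEnt (i, line)) = false := by
          unfold pvCat pvEnt; rw [hsw, he]; rfl
        rw [pvLoopA_cons_noent lines _ hsw he, ih m h]
        unfold pvLastC
        rw [List.foldl_cons, if_neg (by rw [hcat]; simp)]

theorem pvLastLemma (cat : String) (E : List (Int × String)) (m : Int) :
    PySem.List.pyGetD (m :: (E.filter (fun p => pvCat cat p || pvEnt p)).map (·.1)) (-1) 0 =
      pvLastC cat E m := by
  induction E generalizing m with
  | nil =>
    unfold pvLastC
    rw [List.filter_nil, List.map_nil, PySem.List.pyGetD_neg_one _ _ (by simp)]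
    simp
  | cons p E ih =>
    by_cases hc : (pvCat cat p || pvEnt p) = true
    · simp only [List.filter_cons, hc, if_true]
      have h2 : pvLastC cat (p :: E) m = pvLastC cat E p.1 := by
        unfold pvLastC; rw [List.foldl_cons, if_pos hc]
      rw [h2, ← ih p.1]
      rcases hE : (E.filter (fun p => pvCat cat p || pvEnt p)).map (·.1) with _ | ⟨a, l⟩
      · rw [List.map_cons, hE, PySem.List.pyGetD_neg_one _ _ (by simp), PySem.List.pyGetD_neg_one _ _ (by simp)]
        simp [List.getLast_cons]
      · rw [List.map_cons, hE]
        rw [PySem.List.pyGetD_neg_one _ _ (by simp), PySem.List.pyGetD_neg_one _ _ (by simp)]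
        simp [List.getLast_cons]
    · have hc' : (pvCat cat p || pvEnt p) = false := by simpa using hc
      simp only [List.filter_cons, hc', Bool.false_eq_true, if_false]
      have h2 : pvLastC cat (p :: E) m = pvLastC cat E m := by
        unfold pvLastC; rw [List.foldl_cons, if_neg hc]
      rw [h2, ← ih m]

-- filters of the enumerated stripped list, re-read on the enumerated original list
theorem pvEnumStripFilter (lines : List String) (P : Int × String → Bool) :
    ((PySem.List.enumerate (lines.map PySem.Str.strip) 0).filter P).map (·.1)
      = ((PySem.List.enumerate lines 0).filter
          (fun p => P (p.1, PySem.Str.strip p.2))).map (·.1) := by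
  rw [pvEnumMap, List.filter_map, List.map_map]
  rfl

-- a filter of pvHeads, re-read on the enumerated original list
theorem pvHeadsFilter (lines : List String) (q : Int × String → Bool) :
    (((pvHeads (lines.map PySem.Str.strip)).filter q).map (·.1))
      = ((PySem.List.enumerate lines 0).filter
          (fun p => PySem.Str.startswith (PySem.Str.strip p.2) "## "
            && q (p.1, pvHeaderOf (PySem.Str.strip p.2)))).map (·.1) := by
  unfold pvHeads
  rw [List.filter_map, List.map_map, List.filter_filter]
  have h1 : (((fun p : Int × String => p.1) ∘ fun p : Int × String => (p.1, pvHeaderOf p.2)) : Int × String → Int) = (fun p => p.1) := rfl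
  rw [h1]
  rw [pvEnumStripFilter lines
      (fun a => (q ∘ fun p : Int × String => (p.1, pvHeaderOf p.2)) a && PySem.Str.startswith a.2 "## ")]
  refine congrArg _ (List.filter_congr ?_)
  intro a _
  dsimp only
  rw [Bool.and_comm]
  rfl


theorem pvLocate_nil (st : List String) (heads : List (Int × String)) (cat : String)
    (hm : ((heads.filter (fun p => p.2 == cat)).map (·.1)) = ([] : List Int)) :
    pvLocate st heads cat = none := by
  unfold pvLocate
  rw [hm]

theorem pvLocate_cons (st : List String) (heads : List (Int × String)) (cat : String)
    (f : Int) (r : List Int)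
    (hm : ((heads.filter (fun p => p.2 == cat)).map (·.1)) = f :: r) :
    pvLocate st heads cat =
      (match ((heads.filter (fun p => decide (f < p.1) && p.2 != cat)).map (·.1)) with
       | j :: _ => some ((pvBackupB st j.toNat : Nat) : Int)
       | [] => some (PySem.List.pyGetD
          (((PySem.List.enumerate st 0).filter
            (fun p => (f :: r).contains p.1 || (decide (f < p.1) && PySem.Str.startswith p.2 "- http"))).map (·.1))
          (-1) 0 + 1)) := by
  unfold pvLocate
  rw [hm]

set_option maxHeartbeats 2000000 in
theorem pvAttemptEq (lines : List String) (cat : String) :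
    pvAttemptA lines cat =
      match pvLocate (lines.map PySem.Str.strip) (pvHeads (lines.map PySem.Str.strip)) cat with
      | some r => (some r, true)
      | none => (none, false) := by
  have hmine : (((pvHeads (lines.map PySem.Str.strip)).filter (fun p => p.2 == cat)).map (·.1))
      = ((PySem.List.enumerate lines 0).filter (pvCat cat)).map (·.1) :=
    pvHeadsFilter lines (fun p => p.2 == cat)
  cases hfind : lines.find? (fun l => pvCat cat (0, l)) with
  | none =>
    have hall : ∀ p ∈ PySem.List.enumerate lines 0, pvCat cat p = false := by
      intro p hp
      have h2 := (pvMemEnum hp).2.2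
      have h3 := List.find?_eq_none.1 hfind _ h2
      simpa using h3
    have hmnil : ((PySem.List.enumerate lines 0).filter (pvCat cat)) = [] :=
      List.filter_eq_nil_iff.2 (fun a ha => by rw [hall a ha]; simp)
    have hA : pvLoopA lines cat (PySem.List.enumerate lines 0) false none false
        = (none, false, none, false) := by
      have h4 := pvPhase1 lines cat (PySem.List.enumerate lines 0) [] hall
      simpa [pvLoopA] using h4
    have hloc := pvLocate_nil (lines.map PySem.Str.strip) (pvHeads (lines.map PySem.Str.strip)) cat
      (by rw [hmine, hmnil]; rfl)
    rw [hloc]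
    unfold pvAttemptA
    rw [hA]
  | some l0 =>
    rw [List.find?_eq_some_iff_append] at hfind
    obtain ⟨hcat0, pre, suf, hsplit, hpre⟩ := hfind
    subst hsplit
    have hsw0 : PySem.Str.startswith (PySem.Str.strip l0) "## " = true := by
      have := hcat0; unfold pvCat at this; exact ((Bool.and_eq_true _ _).mp this).1
    have heq0 : (pvHeaderOf (PySem.Str.strip l0) == cat) = true := by
      have := hcat0; unfold pvCat at this; exact ((Bool.and_eq_true _ _).mp this).2
    have hpre' : ∀ p ∈ PySem.List.enumerate pre 0, pvCat cat p = false := by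
      intro p hp
      have h2 := (pvMemEnum hp).2.2
      have h3 := hpre _ h2
      have : pvCat cat (0, p.2) = false := by simpa using h3
      exact this
    have hE : PySem.List.enumerate (pre ++ l0 :: suf) 0
        = PySem.List.enumerate pre 0
          ++ ((pre.length : Int), l0) :: PySem.List.enumerate suf ((pre.length : Int) + 1) := by
      rw [PySem.List.enumerate_append, PySem.List.enumerate_cons]
      norm_num
    have hprenil : (PySem.List.enumerate pre 0).filter (pvCat cat) = [] :=
      List.filter_eq_nil_iff.2 (fun a ha => by rw [hpre' a ha]; simp)
    have hfilters : ((PySem.List.enumerate (pre ++ l0 :: suf) 0).filter (pvCat cat)).map (·.1)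
        = (pre.length : Int)
            :: ((PySem.List.enumerate suf ((pre.length : Int) + 1)).filter (pvCat cat)).map (·.1) := by
      rw [hE, List.filter_append, hprenil, List.nil_append, List.filter_cons_of_pos (show pvCat cat ((pre.length : Int), l0) = true from hcat0)]
      rfl
    have hA1 : pvLoopA (pre ++ l0 :: suf) cat (PySem.List.enumerate (pre ++ l0 :: suf) 0) false none false
        = pvLoopA (pre ++ l0 :: suf) cat (PySem.List.enumerate suf ((pre.length : Int) + 1)) true
            (some (pre.length : Int)) true := by
      rw [hE, pvPhase1 _ _ _ _ hpre', pvLoopA_cons_cat _ _ hsw0 heq0]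
    -- every element of `mine` is ≥ pre.length
    have hminege : ∀ x ∈ ((pre.length : Int)
        :: ((PySem.List.enumerate suf ((pre.length : Int) + 1)).filter (pvCat cat)).map (·.1)),
        (pre.length : Int) ≤ x := by
      intro x hx
      rcases List.mem_cons.1 hx with hx | hx
      · omega
      · obtain ⟨p, hp, hpx⟩ := List.mem_map.1 hx
        have := (pvMemEnum (List.mem_of_mem_filter hp)).1
        omega
    have hmineV : (((pvHeads ((pre ++ l0 :: suf).map PySem.Str.strip)).filter (fun p => p.2 == cat)).map (·.1))
        = (pre.length : Int)
            :: ((PySem.List.enumerate suf ((pre.length : Int) + 1)).filter (pvCat cat)).map (·.1) := by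
      rw [hmine, hfilters]
    -- the `nxt` list, over the original lines
    have hnxt : (((pvHeads ((pre ++ l0 :: suf).map PySem.Str.strip)).filter
          (fun p => decide ((pre.length : Int) < p.1) && p.2 != cat)).map (·.1))
        = ((PySem.List.enumerate suf ((pre.length : Int) + 1)).filter (pvOth cat)).map (·.1) := by
      rw [pvHeadsFilter ((pre ++ l0 :: suf)) (fun p => decide ((pre.length : Int) < p.1) && p.2 != cat)]
      rw [hE, List.filter_append]
      have h1 : (PySem.List.enumerate pre 0).filter
          (fun p => PySem.Str.startswith (PySem.Str.strip p.2) "## "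
            && (decide ((pre.length : Int) < p.1) && (pvHeaderOf (PySem.Str.strip p.2) != cat))) = [] := by
        apply List.filter_eq_nil_iff.2
        intro p hp
        have := (pvMemEnum hp).2.1
        have hd : decide ((pre.length : Int) < p.1) = false := by
          simp only [decide_eq_false_iff_not]; push_cast at this ⊢; omega
        simp [hd]
      rw [h1, List.nil_append, List.filter_cons_of_neg (by simp)]
      refine congrArg _ (List.filter_congr ?_)
      intro p hp
      have := (pvMemEnum hp).1
      have hd : decide ((pre.length : Int) < p.1) = true := by
        simp only [decide_eq_true_eq]; omega
      unfold pvOth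
      rw [hd]
      simp [bne]
    cases hfo : (PySem.List.enumerate suf ((pre.length : Int) + 1)).find? (pvOth cat) with
    | some q =>
      obtain ⟨ins', last', hA2⟩ :=
        pvPhase2ret (pre ++ l0 :: suf) cat _ (pre.length : Int) q hfo
      rcases hfl : (PySem.List.enumerate suf ((pre.length : Int) + 1)).filter (pvOth cat)
        with _ | ⟨q0, t⟩
      · rw [← List.head?_filter, hfl] at hfo; simp at hfo
      · have hq0 : q0 = q := by
          rw [← List.head?_filter, hfl] at hfo; simpa using hfo
        subst hq0
        rw [pvLocate_cons _ _ _ _ _ hmineV, hnxt, hfl, List.map_cons]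
        unfold pvAttemptA
        rw [hA1, hA2]
        dsimp only
        rw [pvBackupEq]
    | none =>
      have hA2 := pvPhase2end (pre ++ l0 :: suf) cat _ (pre.length : Int) hfo
      have hflnil : (PySem.List.enumerate suf ((pre.length : Int) + 1)).filter (pvOth cat) = [] :=
        List.filter_eq_nil_iff.2 (List.find?_eq_none.1 hfo)
      have hcands : (((PySem.List.enumerate ((pre ++ l0 :: suf).map PySem.Str.strip) 0).filter
            (fun p => ((pre.length : Int)
                :: ((PySem.List.enumerate suf ((pre.length : Int) + 1)).filter (pvCat cat)).map (·.1)).contains p.1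
              || (decide ((pre.length : Int) < p.1) && PySem.Str.startswith p.2 "- http"))).map (·.1))
          = (pre.length : Int)
              :: ((PySem.List.enumerate suf ((pre.length : Int) + 1)).filter
                  (fun p => pvCat cat p || pvEnt p)).map (·.1) := by
        refine (pvEnumStripFilter (pre ++ l0 :: suf)
          (fun p => ((pre.length : Int)
              :: ((PySem.List.enumerate suf ((pre.length : Int) + 1)).filter (pvCat cat)).map (·.1)).contains p.1
            || (decide ((pre.length : Int) < p.1) && PySem.Str.startswith p.2 "- http"))).trans ?_
        rw [hE, List.filter_append]
        have h1 : (PySem.List.enumerate pre 0).filter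
            (fun p => ((pre.length : Int)
                :: ((PySem.List.enumerate suf ((pre.length : Int) + 1)).filter (pvCat cat)).map (·.1)).contains p.1
              || (decide ((pre.length : Int) < p.1) && PySem.Str.startswith (PySem.Str.strip p.2) "- http")) = [] := by
          apply List.filter_eq_nil_iff.2
          intro p hp
          have hlt := (pvMemEnum hp).2.1
          have hnm : ¬ (p.1 ∈ ((pre.length : Int)
              :: ((PySem.List.enumerate suf ((pre.length : Int) + 1)).filter (pvCat cat)).map (·.1))) := by
            intro hmem
            have := hminege _ hmem
            push_cast at hlt
            omega
          have hc : (((pre.length : Int)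
              :: ((PySem.List.enumerate suf ((pre.length : Int) + 1)).filter (pvCat cat)).map (·.1)).contains p.1) = false := by
            simpa [List.contains_iff_mem] using hnm
          have hd : decide ((pre.length : Int) < p.1) = false := by
            simp only [decide_eq_false_iff_not]
            push_cast at hlt
            omega
          simp only [hc, hd]
          simp
        rw [h1, List.nil_append, List.filter_cons_of_pos (by
          have hmem : ((pre.length : Int)
              :: ((PySem.List.enumerate suf ((pre.length : Int) + 1)).filter (pvCat cat)).map (·.1)).contains
                (((pre.length : Int), l0) : Int × String).1 = true := by
            simp
          rw [hmem]
          simp)]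
        rw [List.map_cons]
        refine congrArg (fun t => ((pre.length : Int) :: t)) (congrArg _ (List.filter_congr ?_))
        intro p hp
        have hge := (pvMemEnum hp).1
        have hd : decide ((pre.length : Int) < p.1) = true := by
          simp only [decide_eq_true_eq]; omega
        have hcon : (((pre.length : Int)
            :: ((PySem.List.enumerate suf ((pre.length : Int) + 1)).filter (pvCat cat)).map (·.1)).contains p.1)
            = pvCat cat p := by
          by_cases hc : pvCat cat p = true
          · have : p.1 ∈ ((PySem.List.enumerate suf ((pre.length : Int) + 1)).filter (pvCat cat)).map (·.1) :=
              List.mem_map.2 ⟨p, List.mem_filter.2 ⟨hp, hc⟩, rfl⟩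
            rw [hc]
            simpa [List.contains_iff_mem] using Or.inr this
          · have hc' : pvCat cat p = false := by simpa using hc
            rw [hc']
            have : ¬ (p.1 ∈ ((pre.length : Int)
                :: ((PySem.List.enumerate suf ((pre.length : Int) + 1)).filter (pvCat cat)).map (·.1))) := by
              intro hmem
              rcases List.mem_cons.1 hmem with hmem | hmem
              · omega
              · obtain ⟨p', hp', hpp⟩ := List.mem_map.1 hmem
                have hp'm := List.mem_filter.1 hp'
                have : p' = p := pvEnumFstInj hp'm.1 hp hpp
                rw [this] at hp'm
                rw [hp'm.2] at hc'
                simp at hc'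
            simpa [List.contains_iff_mem] using this
        rw [hcon, hd]
        unfold pvEnt
        simp
      rw [pvLocate_cons _ _ _ _ _ hmineV, hnxt, hflnil, List.map_nil, hcands, pvLastLemma]
      unfold pvAttemptA
      rw [hA1, hA2]

-- ===== VERDICT (by name: the statement is the Claim_ definition above) =====
theorem find_category_insert_point_py_spec : Claim_equal_find_category_insert_point_py := by
  intro lines category _
  unfold Spec_find_category_insert_point_py find_category_insert_point_py find_category_insert_point_py_alt
  rw [pvAttemptEq, pvAttemptEq]
  cases hl : pvLocate (lines.map PySem.Str.strip) (pvHeads (lines.map PySem.Str.strip)) category <;>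
    cases hl2 : pvLocate (lines.map PySem.Str.strip) (pvHeads (lines.map PySem.Str.strip)) "Miscellaneous KiCad projects" <;> simp [hl, hl2]
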